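-- pv_equiv track=rewrite | github.com/ChanukOh/noob | 프로그래머스/1/135808. 과일 장수/과일 장수.py | solution
-- ===== SOURCE A (Python) =====
-- def solution(k, m, score):
--     answer = []
--     score.sort(reverse=True)
--     cash=0
--     temp_list = []
--     for idx, val in enumerate(score):
--         temp_list.append(val)
--         if (idx + 1) % m == 0:
--             answer.append(temp_list)
--             temp_list = []
--     for i in answer:
--         cash+=i[-1]*len(i)
--     return cash
-- ===== SOURCE B (Python) =====
-- def solution(k, m, score):
--     score.sort(reverse=True)
--     cash = 0
--     for i in range(m - 1, len(score), m):
--         cash += score[i] * m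
--     return cash
-- ===== Notes on version B (the rewrite author's own statement) =====
-- stated objective: simpler
-- what changed: Instead of materialising a list of m-sized boxes and summing last*len over it in a second loop, B sorts the same way and adds score[i]*m directly for the stride of box-minimum indices i = m-1, 2m-1, ... in one pass.
-- outside the precondition, e.g. on solution(0, -2, [1, 2, 3, 4]): A returns 8, B returns 0; on solution(0, 0, [1, 2]): A raises ZeroDivisionError, B raises ValueError
import Mathlib
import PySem

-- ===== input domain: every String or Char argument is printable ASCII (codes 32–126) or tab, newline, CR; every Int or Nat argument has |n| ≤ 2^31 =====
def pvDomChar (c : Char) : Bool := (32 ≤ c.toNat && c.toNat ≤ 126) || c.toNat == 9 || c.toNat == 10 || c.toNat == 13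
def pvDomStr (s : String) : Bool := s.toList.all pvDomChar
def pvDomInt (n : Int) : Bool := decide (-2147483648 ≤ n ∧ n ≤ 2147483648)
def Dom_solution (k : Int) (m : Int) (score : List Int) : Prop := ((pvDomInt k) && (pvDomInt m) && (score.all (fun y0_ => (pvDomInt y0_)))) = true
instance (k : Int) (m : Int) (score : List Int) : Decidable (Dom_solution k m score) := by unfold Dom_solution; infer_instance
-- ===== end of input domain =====

-- B drops A's list-of-boxes grouping: after the same descending sort it adds score[i]*m once per
-- box-minimum index i = m-1, 2m-1, … in a single stride loop (objective: simpler).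
-- Both Pythons sort `score` in place (same caller-visible mutation); the theorems are about the return value.

-- ===== PORT A =====
-- the body of A's enumerate loop (temp_list.append(val); flush when (idx+1) % m == 0)
def stepA (m : Int) (p : List (List Int) × List Int) (iv : Int × Int) : List (List Int) × List Int :=
  let temp_list := p.2 ++ [iv.2]
  if PySem.Int.mod (iv.1 + 1) m == 0 then (p.1 ++ [temp_list], ([] : List Int))
  else (p.1, temp_list)

def solution (k : Int) (m : Int) (score : List Int) : Int :=
  -- answer = []; score.sort(reverse=True); cash = 0; temp_list = []
  let s := PySem.List.sorted score (fun x => x) true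
  let st := (PySem.List.enumerate s 0).foldl (stepA m) (([] : List (List Int)), ([] : List Int))
  -- i[-1] via pyGet?; every i in answer is nonempty, so the .getD 0 default is never used
  st.1.foldl (fun cash i => cash + (PySem.List.pyGet? i (-1)).getD 0 * (i.length : Int)) 0

-- ===== PORT B =====
def solution_alt (k : Int) (m : Int) (score : List Int) : Int :=
  let s := PySem.List.sorted score (fun x => x) true
  -- score[i] via pyGetD; every generated index is in range for m ≥ 1, so the default 0 is never used
  (PySem.List.pyRange (m - 1) (s.length : Int) m).foldl
    (fun cash i => cash + PySem.List.pyGetD s i 0 * m) 0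

-- ===== PRECONDITION & SPEC =====
-- Pre_ excludes m ≤ 0: at m = 0 both programs raise (A a ZeroDivisionError at `% m`, B a ValueError
-- from range step 0), and for negative m the box size is meaningless — A's `% m` test accidentally
-- groups as if m were |m| while B's empty range yields 0, a corner neither value of which anyone
-- would specify.
def Pre_solution (k : Int) (m : Int) (score : List Int) : Prop := 1 ≤ m
instance (k : Int) (m : Int) (score : List Int) : Decidable (Pre_solution k m score) := by unfold Pre_solution; infer_instance
def pvWitness_solution : Int × Int × List Int := (4, 3, [4, 1, 2, 2, 5, 1, 2])
def Spec_solution (k : Int) (m : Int) (score : List Int) (out : Int) : Prop := out = solution_alt k m score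
instance (k : Int) (m : Int) (score : List Int) (out : Int) : Decidable (Spec_solution k m score out) := by unfold Spec_solution; infer_instance

-- ===== CLAIM (what is proved, stated in full; the proofs are below) =====
def Claim_equal_solution : Prop := ∀ (k : Int) (m : Int) (score : List Int), Dom_solution k m score → Pre_solution k m score → Spec_solution k m score (solution k m score)

-- ===== LEMMAS AND PROOFS =====

-- sum of every n-th element of s, the first picked element sitting c positions in
def strideSum (n : Nat) : Nat → List Int → Int
  | _, [] => 0
  | 0, x :: xs => x + strideSum n (n - 1) xs
  | c + 1, _ :: xs => strideSum n c xs

-- A's loops: the fold over `enumerate` followed by the cash loop computes n * strideSum.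
-- Invariants: c steps remain until the next flush, the current box has n - c - 1 elements,
-- and `% m` fires exactly when m divides idx + 1.
lemma A_cash (m : Int) (n : Nat) (hm : m = (n : Int)) (hn : 0 < n) :
    ∀ (s : List Int) (start : Int) (ans : List (List Int)) (temp : List Int) (c : Nat),
      temp.length + c + 1 = n →
      (m ∣ start + 1 + (c : Int)) →
      (∀ j : Nat, j < c → ¬ m ∣ start + 1 + (j : Int)) →
      ((((PySem.List.enumerate s start).foldl (stepA m) (ans, temp)).1).map
          (fun i => (PySem.List.pyGet? i (-1)).getD 0 * (i.length : Int))).sum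
        = (ans.map (fun i => (PySem.List.pyGet? i (-1)).getD 0 * (i.length : Int))).sum
            + (n : Int) * strideSum n c s := by
  intro s
  induction s with
  | nil =>
    intro start ans temp c h1 h2 h3
    cases c <;> simp [PySem.List.enumerate_nil, strideSum]
  | cons x xs ih =>
    intro start ans temp c h1 h2 h3
    rw [PySem.List.enumerate_cons, List.foldl_cons]
    cases c with
    | zero =>
      have hfire : PySem.Int.mod (start + 1) m = 0 := by
        rw [PySem.Int.mod_eq_zero_iff_dvd]
        simpa using h2
      have hstep : stepA m (ans, temp) (start, x) = (ans ++ [temp ++ [x]], ([] : List Int)) := by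
        simp [stepA, hfire]
      rw [hstep]
      rw [ih (start + 1) (ans ++ [temp ++ [x]]) [] (n - 1)
        (by simp only [List.length_nil]; omega)
        (by
          have : m ∣ start + 1 := by simpa using h2
          have hcast : start + 1 + 1 + ((n - 1 : Nat) : Int) = (start + 1) + m := by
            rw [hm]; push_cast [Nat.cast_sub hn]; ring
          rw [hcast]
          exact dvd_add this dvd_rfl)
        (by
          intro j hj
          have hdv : m ∣ start + 1 := by simpa using h2
          intro hc
          have : m ∣ ((j : Int) + 1) := by
            have := dvd_sub hc hdv
            have he : start + 1 + 1 + (j : Int) - (start + 1) = (j : Int) + 1 := by ring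
            rwa [he] at this
          have hle : m ≤ (j : Int) + 1 := Int.le_of_dvd (by positivity) this
          rw [hm] at hle
          omega)]
      have hbox : (PySem.List.pyGet? (temp ++ [x]) (-1)).getD 0 * ((temp ++ [x]).length : Int)
          = x * (n : Int) := by
        rw [PySem.List.pyGet?_neg_one_append_singleton]
        simp only [Option.getD_some, List.length_append, List.length_singleton]
        congr 1
        omega
      rw [List.map_append, List.sum_append]
      simp only [List.map_cons, List.map_nil, List.sum_cons, List.sum_nil, hbox, strideSum]
      ring
    | succ c' =>
      have hnofire : ¬ PySem.Int.mod (start + 1) m = 0 := by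
        rw [PySem.Int.mod_eq_zero_iff_dvd]
        have := h3 0 (by omega)
        simpa using this
      have hstep : stepA m (ans, temp) (start, x) = (ans, temp ++ [x]) := by
        simp [stepA, hnofire]
      rw [hstep]
      rw [ih (start + 1) ans (temp ++ [x]) c'
        (by simp at h1 ⊢; omega)
        (by
          have hcast : start + 1 + 1 + (c' : Int) = start + 1 + ((c' + 1 : Nat) : Int) := by
            push_cast; ring
          rw [hcast]; exact h2)
        (by
          intro j hj
          have := h3 (j + 1) (by omega)
          intro hc
          apply this
          have hcast : start + 1 + ((j + 1 : Nat) : Int) = start + 1 + 1 + (j : Int) := by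
            push_cast; ring
          rw [hcast]; exact hc)]
      simp [strideSum]

-- my pyRange facts for a positive step other than 1 (not in the prelude's lemma list)
lemma pyRange_pos_cons (a b s : Int) (hs : 0 < s) (hab : a < b) :
    PySem.List.pyRange a b s = a :: PySem.List.pyRange (a + s) b s := by
  rw [PySem.List.pyRange_of_pos _ _ hs, PySem.List.pyRange_of_pos _ _ hs]
  rw [if_pos hab]
  have hcount : ((b - a + s - 1) / s).toNat
      = (if a + s < b then ((b - (a + s) + s - 1) / s).toNat else 0) + 1 := by
    by_cases h2 : a + s < b
    · rw [if_pos h2]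
      have : b - a + s - 1 = (b - (a + s) + s - 1) + 1 * s := by ring
      rw [this, Int.add_mul_ediv_right _ _ (by omega)]
      have hnn : 0 ≤ (b - (a + s) + s - 1) / s := Int.ediv_nonneg (by omega) (by omega)
      omega
    · rw [if_neg h2]
      have hq1 : 1 ≤ (b - a + s - 1) / s := by
        rw [Int.le_ediv_iff_mul_le hs]; omega
      have hq2 : (b - a + s - 1) / s < 2 := by
        rw [Int.ediv_lt_iff_lt_mul hs]; omega
      omega
  rw [hcount, List.range_succ_eq_map]
  simp only [List.map_cons, List.map_map]
  congr 1
  · push_cast; ring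
  · apply List.map_congr_left
    intro j _
    simp only [Function.comp_apply]
    push_cast
    ring

lemma pyRange_pos_shift (a b s : Int) (hs : 0 < s) :
    PySem.List.pyRange (a + 1) (b + 1) s = (PySem.List.pyRange a b s).map (· + 1) := by
  rw [PySem.List.pyRange_of_pos _ _ hs, PySem.List.pyRange_of_pos _ _ hs, List.map_map]
  have h1 : b + 1 - (a + 1) = b - a := by ring
  have h2 : ((a : Int) + 1 < b + 1) ↔ (a < b) := by omega
  rw [h1]
  simp only [h2]
  apply List.map_congr_left
  intro j _
  simp only [Function.comp_apply]
  ring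

-- B's stride loop over the same list computes strideSum.
lemma B_sum (n : Nat) (hn : 0 < n) :
    ∀ (s : List Int) (c : Nat),
      ((PySem.List.pyRange (c : Int) (s.length : Int) (n : Int)).map
        (fun i => PySem.List.pyGetD s i 0)).sum = strideSum n c s := by
  intro s
  induction s with
  | nil =>
    intro c
    rw [PySem.List.pyRange_of_pos _ _ (by exact_mod_cast hn)]
    have hif : ((c : Int) < ((([] : List Int).length : Nat) : Int)) = False := by simp
    simp only [hif, if_false]
    cases c <;> simp [strideSum]
  | cons x xs ih =>
    intro c
    have hshift : ∀ (c0 : Nat),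
        ((PySem.List.pyRange ((c0 : Int) + 1) (((x :: xs).length : Int)) (n : Int)).map
          (fun i => PySem.List.pyGetD (x :: xs) i 0)).sum = strideSum n c0 xs := by
      intro c0
      have hlen : ((x :: xs).length : Int) = (xs.length : Int) + 1 := by push_cast [List.length_cons]; ring
      rw [hlen, pyRange_pos_shift _ _ _ (by exact_mod_cast hn), List.map_map]
      rw [← ih c0]
      apply congrArg
      apply List.map_congr_left
      intro i hi
      have hnn : 0 ≤ i := by
        rcases (PySem.List.mem_pyRange_iff_of_pos (by exact_mod_cast hn) i).1 hi with ⟨h1, _, _⟩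
        omega
      simp only [Function.comp_apply]
      rw [PySem.List.pyGetD_of_nonneg _ _ hnn, PySem.List.pyGetD_of_nonneg _ _ (by omega)]
      have : (i + 1).toNat = i.toNat + 1 := by omega
      rw [this, List.getD_cons_succ]
    cases c with
    | zero =>
      rw [pyRange_pos_cons _ _ _ (by exact_mod_cast hn) (by push_cast [List.length_cons]; positivity)]
      simp only [List.map_cons, List.sum_cons, Nat.cast_zero]
      have h0 : PySem.List.pyGetD (x :: xs) 0 0 = x := by
        simp [PySem.List.pyGetD]
      have hns : (0 : Int) + (n : Int) = ((n - 1 : Nat) : Int) + 1 := by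
        push_cast [Nat.cast_sub hn]; ring
      rw [h0, hns, hshift (n - 1)]
      simp [strideSum]
    | succ c' =>
      have hc : ((c' + 1 : Nat) : Int) = (c' : Int) + 1 := by push_cast; ring
      rw [hc, hshift c']
      simp [strideSum]

-- ===== VERDICT (by name: the statement is the Claim_ definition above) =====
theorem solution_spec : Claim_equal_solution := by
  intro k m score _ hpre
  unfold Spec_solution solution solution_alt
  have hpm : 1 ≤ m := hpre
  have hn : 0 < m.toNat := by omega
  have hm : m = (m.toNat : Int) := by omega
  set n := m.toNat with hn'
  set s := PySem.List.sorted score (fun x => x) true with hs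
  rw [PySem.List.foldl_add]
  rw [A_cash m n hm hn s 0 [] [] (n - 1)
    (by simp only [List.length_nil]; omega)
    (by
      have hcast : (0 : Int) + 1 + ((n - 1 : Nat) : Int) = m := by
        push_cast [Nat.cast_sub hn]; omega
      rw [hcast])
    (by
      intro j hj hdvd
      have hle : m ≤ (0 : Int) + 1 + (j : Int) := Int.le_of_dvd (by positivity) hdvd
      omega)]
  rw [PySem.List.foldl_add]
  have hsplit : ∀ (l : List Int),
      (l.map (fun i => PySem.List.pyGetD s i 0 * m)).sum
        = (l.map (fun i => PySem.List.pyGetD s i 0)).sum * m := by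
    intro l
    induction l with
    | nil => simp
    | cons a t iht => simp [iht, add_mul]
  rw [hsplit]
  have hm1 : m - 1 = ((n - 1 : Nat) : Int) := by push_cast [Nat.cast_sub hn]; omega
  rw [hm1, hm, B_sum n hn s (n - 1)]
  simp only [List.map_nil, List.sum_nil, zero_add]
  ring
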